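-- pv_equiv track=rewrite | github.com/Jochuuuu/PVSProyectoB | sql.py | safe_split_and_conditions
-- ===== SOURCE A (Python) =====
-- def safe_split_and_conditions(clause):
--     """Divide condiciones por AND de manera segura"""
--     if not clause:
--         return []
--
--     # Convertir a mayúsculas para búsqueda
--     clause_upper = clause.upper()
--     parts = []
--     current_part = ""
--     i = 0
--
--     while i < len(clause):
--         # Buscar " AND " (con espacios)
--         if (
--             i <= len(clause) - 5
--             and clause_upper[i : i + 5] == " AND "
--             and (i == 0 or clause[i - 1] == " ")
--             and (i + 5 >= len(clause) or clause[i + 5] == " ")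
--         ):
--
--             # Encontramos un AND, guardar parte actual
--             if current_part.strip():
--                 parts.append(current_part.strip())
--             current_part = ""
--             i += 5  # Saltar " AND "
--         else:
--             current_part += clause[i]
--             i += 1
--
--     # Agregar última parte
--     if current_part.strip():
--         parts.append(current_part.strip())
--
--     return parts
-- ===== SOURCE B (Python) =====
-- def safe_split_and_conditions(clause):
--     """Divide condiciones por AND de manera segura"""
--     if not clause:
--         return []
--
--     cu = clause.upper()
--     n = len(clause)
--     # Phase 1: collect every index where a delimiter " AND " starts.
--     cuts = [
--         i
--         for i in range(n - 4)
--         if i + 5 <= n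
--         and cu[i : i + 5] == " AND "
--         and (i == 0 or clause[i - 1] == " ")
--         and (i + 5 >= n or clause[i + 5] == " ")
--     ]
--     # Phase 2: slice between the cuts.
--     parts = []
--     prev = 0
--     for c in cuts:
--         piece = clause[prev:c].strip()
--         if piece:
--             parts.append(piece)
--         prev = c + 5
--     last = clause[prev:].strip()
--     if last:
--         parts.append(last)
--     return parts
-- ===== Notes on version B (the rewrite author's own statement) =====
-- stated objective: faster
-- what changed: Replaces the stateful char-by-char accumulation loop (mutable current_part rebuilt one character at a time) with two plain passes: collect all delimiter start indices, then slice the clause between consecutive cuts.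
import Mathlib
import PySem

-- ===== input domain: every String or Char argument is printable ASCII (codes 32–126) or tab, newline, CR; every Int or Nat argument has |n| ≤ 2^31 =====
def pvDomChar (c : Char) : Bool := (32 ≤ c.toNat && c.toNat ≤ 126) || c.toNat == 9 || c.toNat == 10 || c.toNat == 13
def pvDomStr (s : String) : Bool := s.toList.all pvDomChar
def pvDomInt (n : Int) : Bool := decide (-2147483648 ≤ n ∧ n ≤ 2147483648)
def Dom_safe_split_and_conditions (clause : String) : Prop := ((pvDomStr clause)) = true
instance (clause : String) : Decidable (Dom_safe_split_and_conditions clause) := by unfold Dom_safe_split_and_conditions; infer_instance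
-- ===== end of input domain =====

-- B replaces A's stateful char-by-char accumulation loop by two plain passes
-- (collect delimiter start indices, then slice between them), avoiding the per-character string rebuild; objective: faster (measured).

-- ===== PORT A =====
-- the delimiter test both Pythons spell out literally:
-- i <= len-5 and upper[i:i+5]==" AND " and (i==0 or clause[i-1]==" ") and (i+5>=len or clause[i+5]==" ")
def pvAndCond (cs csU : List Char) (i : Nat) : Bool :=
  decide (i + 5 ≤ cs.length)
  && ((csU.drop i).take 5 == [' ', 'A', 'N', 'D', ' '])
  && (i == 0 || cs.getD (i - 1) ' ' == ' ')
  && (decide (cs.length ≤ i + 5) || cs.getD (i + 5) ' ' == ' ')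

-- A's while-loop: state (i, parts, current_part)
def pvALoop (cs csU : List Char) (i : Nat) (parts : List String) (cur : List Char) :
    List String :=
  if i < cs.length then
    if pvAndCond cs csU i then
      pvALoop cs csU (i + 5)
        (if PySem.Chars.strip cur == [] then parts
         else parts ++ [String.ofList (PySem.Chars.strip cur)]) []
    else
      pvALoop cs csU (i + 1) parts (cur ++ [cs.getD i ' '])
  else
    if PySem.Chars.strip cur == [] then parts
    else parts ++ [String.ofList (PySem.Chars.strip cur)]
termination_by cs.length - i
decreasing_by all_goals omega

def safe_split_and_conditions (clause : String) : List String :=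
  if clause.toList == [] then []
  else pvALoop clause.toList (PySem.Chars.upper clause.toList) 0 [] []

-- ===== PORT B =====
-- phase 2: for c in cuts: slice clause[prev:c], strip, keep if nonempty; then the tail
def pvBPhase2 (cs : List Char) (cuts : List Nat) (prev : Nat) (acc : List String) :
    List String :=
  match cuts with
  | [] =>
      let last := PySem.Chars.strip (cs.drop prev)
      if last == [] then acc else acc ++ [String.ofList last]
  | c :: rest =>
      let piece := PySem.Chars.strip ((cs.drop prev).take (c - prev))
      pvBPhase2 cs rest (c + 5)
        (if piece == [] then acc else acc ++ [String.ofList piece])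

def safe_split_and_conditions_alt (clause : String) : List String :=
  if clause.toList == [] then []
  else
    let cs := clause.toList
    let csU := PySem.Chars.upper cs
    -- phase 1: [i for i in range(n-4) if <delimiter test>]
    let cuts := (List.range (cs.length - 4)).filter (fun i => pvAndCond cs csU i)
    pvBPhase2 cs cuts 0 []

-- ===== PRECONDITION & SPEC =====
def Spec_safe_split_and_conditions (clause : String) (out : List String) : Prop := out = safe_split_and_conditions_alt clause
instance (clause : String) (out : List String) : Decidable (Spec_safe_split_and_conditions clause out) := by unfold Spec_safe_split_and_conditions; infer_instance

-- ===== CLAIM (what is proved, stated in full; the proofs are below) =====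
def Claim_equal_safe_split_and_conditions : Prop := ∀ (clause : String), Dom_safe_split_and_conditions clause → Spec_safe_split_and_conditions clause (safe_split_and_conditions clause)

-- ===== LEMMAS AND PROOFS =====

-- the window equation pins the upper-cased character at offset k
lemma pvWindow_char (csU : List Char) (i k : Nat) (hk : k < 5) (hlen : i + 5 ≤ csU.length)
    (hw : (csU.drop i).take 5 = [' ', 'A', 'N', 'D', ' ']) :
    csU[i + k]'(by omega) = [' ', 'A', 'N', 'D', ' '][k]'(by simp; omega) := by
  have h1 : ((csU.drop i).take 5)[k]'(by simp [hw]; omega) = csU[i + k]'(by omega) := by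
    simp [List.getElem_take, List.getElem_drop]
  rw [← h1]
  exact List.getElem_of_eq hw _

-- upper is character-wise
lemma pvUpper_eq (cs : List Char) :
    PySem.Chars.upper cs = cs.map PySem.Chars.upperChar := rfl

-- the first conjunct of the delimiter test
lemma pvCond_len (cs csU : List Char) (i : Nat) (h : pvAndCond cs csU i = true) :
    i + 5 ≤ cs.length := by
  simp only [pvAndCond, Bool.and_eq_true, decide_eq_true_eq] at h
  exact h.1.1.1

-- a delimiter match forbids another match at the next four positions
lemma pvCond_spacing (cs : List Char) (i k : Nat) (h1 : 1 ≤ k) (h4 : k ≤ 4)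
    (hc : pvAndCond cs (PySem.Chars.upper cs) i = true) :
    pvAndCond cs (PySem.Chars.upper cs) (i + k) = false := by
  rw [Bool.eq_false_iff]
  intro h2
  simp only [pvAndCond, Bool.and_eq_true, beq_iff_eq, Bool.or_eq_true, decide_eq_true_eq] at hc h2
  obtain ⟨⟨⟨hlen, hw⟩, -⟩, -⟩ := hc
  obtain ⟨⟨⟨hlen2, hw2⟩, hprev2⟩, -⟩ := h2
  have hUlen : (PySem.Chars.upper cs).length = cs.length := by
    rw [pvUpper_eq]; simp
  have hchar : ∀ k', (hk' : k' < 5) →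
      (PySem.Chars.upper cs)[i + k']'(by omega) =
        [' ', 'A', 'N', 'D', ' '][k']'(by simp; omega) :=
    fun k' hk' => pvWindow_char _ i k' hk' (by omega) hw
  have hchar2 : (PySem.Chars.upper cs)[i + k]'(by omega) =
      [' ', 'A', 'N', 'D', ' '][0]'(by simp) := by
    have := pvWindow_char _ (i + k) 0 (by omega) (by omega) hw2
    simpa using this
  interval_cases k
  · have := hchar 1 (by omega)
    rw [hchar2] at this
    simp at this
  · have := hchar 2 (by omega)
    rw [hchar2] at this
    simp at this
  · have := hchar 3 (by omega)
    rw [hchar2] at this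
    simp at this
  · -- k = 4: the character before position i+4 is 'D' (or 'd'), not a space
    rcases hprev2 with h0 | hsp
    · omega
    · have hd := hchar 3 (by omega)
      have hidx : i + 4 - 1 = i + 3 := by omega
      rw [hidx, List.getD_eq_getElem cs ' ' (by omega)] at hsp
      have hm : (PySem.Chars.upper cs)[i + 3]'(by omega) =
          PySem.Chars.upperChar (cs[i + 3]'(by omega)) := by
        simp [pvUpper_eq]
      rw [hsp] at hm
      have : PySem.Chars.upperChar ' ' = 'D' := by
        have h5 := hm.symm.trans hd
        simpa using h5
      exact absurd this (by decide)

-- the members of the cut list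
lemma pvMem_cuts (cs : List Char) (j : Nat) :
    j ∈ (List.range (cs.length - 4)).filter (fun i => pvAndCond cs (PySem.Chars.upper cs) i)
      ↔ j < cs.length - 4 ∧ pvAndCond cs (PySem.Chars.upper cs) j = true := by
  simp [List.mem_filter, List.mem_range]

-- the cut list is strictly increasing
lemma pvCuts_pairwise (cs : List Char) :
    ((List.range (cs.length - 4)).filter
      (fun i => pvAndCond cs (PySem.Chars.upper cs) i)).Pairwise (· < ·) :=
  List.Pairwise.sublist List.filter_sublist List.pairwise_lt_range

-- splitting the pending-cut list at a match
lemma pvFilter_split (l : List Nat) (i : Nat) (hs : l.Pairwise (· < ·)) (hmem : i ∈ l)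
    (hgap : ∀ j ∈ l, i < j → i + 5 ≤ j) :
    l.filter (fun c => decide (i ≤ c)) = i :: l.filter (fun c => decide (i + 5 ≤ c)) := by
  induction l with
  | nil => cases hmem
  | cons a t ih =>
    rcases List.mem_cons.mp hmem with heq | hmt
    · subst heq
      have htail : t.filter (fun c => decide (i ≤ c)) = t.filter (fun c => decide (i + 5 ≤ c)) := by
        refine List.filter_congr ?_
        intro j hj
        have haj : i < j := (List.pairwise_cons.mp hs).1 j hj
        have : i + 5 ≤ j := hgap j (List.mem_cons_of_mem i hj) haj
        simp only [decide_eq_decide]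
        omega
      simp only [List.filter_cons, decide_eq_true_eq]
      rw [if_pos (le_refl i), if_neg (by omega), htail]
    · have hai : a < i := (List.pairwise_cons.mp hs).1 i hmt
      simp only [List.filter_cons, decide_eq_true_eq]
      rw [if_neg (by omega), if_neg (by omega)]
      exact ih (List.Pairwise.of_cons hs) hmt
        (fun j hj hij => hgap j (List.mem_cons_of_mem a hj) hij)

-- stepping past a non-match
lemma pvFilter_step (l : List Nat) (i : Nat) (hmem : i ∉ l) :
    l.filter (fun c => decide (i ≤ c)) = l.filter (fun c => decide (i + 1 ≤ c)) := by
  refine List.filter_congr ?_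
  intro j hj
  have : j ≠ i := fun h => hmem (h ▸ hj)
  simp only [decide_eq_decide]
  omega

-- the terminal step of the loop, shared by both induction cases below
lemma pvLoop_base (cs : List Char) (p : Nat) (_hp : p ≤ cs.length) (parts : List String) :
    pvALoop cs (PySem.Chars.upper cs) cs.length parts ((cs.drop p).take (cs.length - p)) =
      pvBPhase2 cs
        (((List.range (cs.length - 4)).filter
            (fun j => pvAndCond cs (PySem.Chars.upper cs) j)).filter
          (fun c => decide (cs.length ≤ c))) p parts := by
  rw [pvALoop, if_neg (by omega)]
  have hnil : (((List.range (cs.length - 4)).filter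
      (fun j => pvAndCond cs (PySem.Chars.upper cs) j)).filter
        (fun c => decide (cs.length ≤ c))) = [] := by
    rw [List.filter_eq_nil_iff]
    intro c hc
    have := (pvMem_cuts cs c).mp hc
    simp only [decide_eq_true_eq]
    omega
  rw [hnil, pvBPhase2]
  have htake : (cs.drop p).take (cs.length - p) = cs.drop p :=
    List.take_of_length_le (by simp)
  rw [htake]

-- main loop invariant: A's loop from i with cur = cs[p:i] equals B's phase 2 on the cuts ≥ i
lemma pvLoop_eq_aux (cs : List Char) (n : Nat) :
    ∀ i p, cs.length - i ≤ n → p ≤ i → i ≤ cs.length → ∀ parts,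
    pvALoop cs (PySem.Chars.upper cs) i parts ((cs.drop p).take (i - p)) =
      pvBPhase2 cs
        (((List.range (cs.length - 4)).filter
            (fun j => pvAndCond cs (PySem.Chars.upper cs) j)).filter
          (fun c => decide (i ≤ c))) p parts := by
  induction n with
  | zero =>
    intro i p hn hp hi parts
    have hieq : i = cs.length := by omega
    subst hieq
    exact pvLoop_base cs p hp parts
  | succ n ih =>
    intro i p hn hp hi parts
    by_cases hlt : i < cs.length
    · rw [pvALoop, if_pos hlt]
      by_cases hc : pvAndCond cs (PySem.Chars.upper cs) i = true
      · rw [if_pos hc]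
        have hlen5 : i + 5 ≤ cs.length := pvCond_len _ _ _ hc
        have hmem : i ∈ (List.range (cs.length - 4)).filter
            (fun j => pvAndCond cs (PySem.Chars.upper cs) j) :=
          (pvMem_cuts cs i).mpr ⟨by omega, hc⟩
        have hgap : ∀ j ∈ (List.range (cs.length - 4)).filter
            (fun j => pvAndCond cs (PySem.Chars.upper cs) j), i < j → i + 5 ≤ j := by
          intro j hj hij
          by_contra hlt5
          have hj' := (pvMem_cuts cs j).mp hj
          have hk : j = i + (j - i) := by omega
          have := pvCond_spacing cs i (j - i) (by omega) (by omega) hc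
          rw [← hk] at this
          rw [hj'.2] at this
          exact absurd this (by decide)
        rw [pvFilter_split _ i (pvCuts_pairwise cs) hmem hgap, pvBPhase2]
        have := ih (i + 5) (i + 5) (by omega) (le_refl _) hlen5
          (if PySem.Chars.strip ((cs.drop p).take (i - p)) == [] then parts
           else parts ++ [String.ofList (PySem.Chars.strip ((cs.drop p).take (i - p)))])
        simpa using this
      · rw [if_neg hc]
        have hstep : (cs.drop p).take (i - p) ++ [cs.getD i ' '] =
            (cs.drop p).take (i + 1 - p) := by
          have h1 : i + 1 - p = (i - p) + 1 := by omega
          rw [h1, List.take_add_one]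
          have hpi : p + (i - p) = i := by omega
          have h2 : (cs.drop p)[i - p]? = some (cs.getD i ' ') := by
            rw [List.getElem?_drop, hpi, List.getElem?_eq_getElem hlt,
              List.getD_eq_getElem cs ' ' hlt]
          rw [h2]
          rfl
        have hnmem : i ∉ (List.range (cs.length - 4)).filter
            (fun j => pvAndCond cs (PySem.Chars.upper cs) j) := by
          intro hmem
          exact hc ((pvMem_cuts cs i).mp hmem).2
        rw [hstep, pvFilter_step _ i hnmem]
        exact ih (i + 1) p (by omega) (by omega) (by omega) parts
    · have hieq : i = cs.length := by omega
      subst hieq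
      exact pvLoop_base cs p hp parts

lemma pvLoop_eq (cs : List Char) (i p : Nat) (hp : p ≤ i) (hi : i ≤ cs.length)
    (parts : List String) :
    pvALoop cs (PySem.Chars.upper cs) i parts ((cs.drop p).take (i - p)) =
      pvBPhase2 cs
        (((List.range (cs.length - 4)).filter
            (fun j => pvAndCond cs (PySem.Chars.upper cs) j)).filter
          (fun c => decide (i ≤ c))) p parts :=
  pvLoop_eq_aux cs (cs.length - i) i p (le_refl _) hp hi parts

-- ===== VERDICT (by name: the statement is the Claim_ definition above) =====
theorem safe_split_and_conditions_spec : Claim_equal_safe_split_and_conditions := by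
  intro clause _
  unfold Spec_safe_split_and_conditions safe_split_and_conditions safe_split_and_conditions_alt
  by_cases h : clause.toList = []
  · simp [h]
  · have h' : (clause.toList == []) = false := by simp [h]
    rw [h']
    simp only [Bool.false_eq_true, if_false]
    have := pvLoop_eq clause.toList 0 0 (le_refl 0) (Nat.zero_le _) []
    simpa using this
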